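-- pv_equiv track=rewrite | github.com/chunyu-atx/Dia-Pangu | dia-pangu-pruning/after-pruning-tools/train_pruned_EN_cli.py | make_drop_tag
-- ===== SOURCE A (Python) =====
-- from typing import Optional, Dict, Sequence, List, Tuple
--
-- def make_drop_tag(drop_layers: List[int]) -> str:
--     if not drop_layers:
--         return "dropNone"
--     s = sorted(drop_layers)
--     is_contig = all(s[i] + 1 == s[i + 1] for i in range(len(s) - 1))
--     if is_contig:
--         return f"drop{s[0]}_{s[-1]}"
--     return "drop" + "_".join(str(x) for x in s)
-- ===== SOURCE B (Python) =====
-- def make_drop_tag(drop_layers):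
--     if not drop_layers:
--         return "dropNone"
--     lo, hi = min(drop_layers), max(drop_layers)
--     if hi - lo == len(drop_layers) - 1 and len(set(drop_layers)) == len(drop_layers):
--         return "drop%d_%d" % (lo, hi)
--     return "drop" + "_".join(str(x) for x in sorted(drop_layers))
-- ===== Notes on version B (the rewrite author's own statement) =====
-- stated objective: alternative
-- what changed: A sorts and then scans adjacent pairs to test contiguity; B decides the same contiguity by the closed-form test max-min == len-1 combined with a distinct-count (set) check, so the contiguous path needs no sort and no pairwise scan, sorting only for the non-contiguous join.
import Mathlib
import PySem

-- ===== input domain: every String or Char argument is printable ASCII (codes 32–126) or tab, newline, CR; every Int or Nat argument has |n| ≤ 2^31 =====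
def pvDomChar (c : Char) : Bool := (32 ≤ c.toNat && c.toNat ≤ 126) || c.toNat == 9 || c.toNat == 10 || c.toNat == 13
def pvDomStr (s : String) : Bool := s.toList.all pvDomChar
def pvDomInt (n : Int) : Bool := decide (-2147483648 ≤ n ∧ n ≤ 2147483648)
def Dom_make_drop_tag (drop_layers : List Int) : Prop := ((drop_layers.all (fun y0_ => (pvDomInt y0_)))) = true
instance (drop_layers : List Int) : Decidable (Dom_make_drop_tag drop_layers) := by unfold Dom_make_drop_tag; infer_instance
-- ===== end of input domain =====

-- B replaces A's sort + pairwise contiguity scan by a single min/max/distinct-count test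
-- (no sort at all on the contiguous path); objective: alternative/simpler decomposition.

-- ===== PORT A =====
-- Literal port of A. The indices drawn from range(len(s)-1) are always in range,
-- so pyGetD's default 0 is never used (same for s[0] and s[-1] on the nonempty list).
def make_drop_tag (drop_layers : List Int) : String :=
  if drop_layers = [] then "dropNone"
  else
    let s := PySem.List.sorted drop_layers (fun x => x)
    let is_contig := (PySem.List.pyRange 0 ((s.length : Int) - 1)).all
        (fun i => PySem.List.pyGetD s i 0 + 1 == PySem.List.pyGetD s (i + 1) 0)
    if is_contig then
      "drop" ++ PySem.Int.toStr (PySem.List.pyGetD s 0 0) ++ "_" ++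
        PySem.Int.toStr (PySem.List.pyGetD s (-1) 0)
    else
      "drop" ++ PySem.Str.join "_" (s.map PySem.Int.toStr)

-- ===== PORT B =====
-- Literal port of B (Source B). The list is nonempty past the guard, so min/max exist
-- and .getD 0 is never used.
def make_drop_tag_alt (drop_layers : List Int) : String :=
  if drop_layers = [] then "dropNone"
  else
    let lo := (PySem.List.min? drop_layers (fun x => x)).getD 0
    let hi := (PySem.List.max? drop_layers (fun x => x)).getD 0
    if (hi - lo == (drop_layers.length : Int) - 1) &&
        (PySem.Set.len (PySem.Set.ofList drop_layers) == (drop_layers.length : Int)) then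
      "drop" ++ PySem.Int.toStr lo ++ "_" ++ PySem.Int.toStr hi
    else
      "drop" ++ PySem.Str.join "_"
        ((PySem.List.sorted drop_layers (fun x => x)).map PySem.Int.toStr)

-- ===== PRECONDITION & SPEC =====
def Spec_make_drop_tag (drop_layers : List Int) (out : String) : Prop := out = make_drop_tag_alt drop_layers
instance (drop_layers : List Int) (out : String) : Decidable (Spec_make_drop_tag drop_layers out) := by unfold Spec_make_drop_tag; infer_instance

-- ===== CLAIM (what is proved, stated in full; the proofs are below) =====
def Claim_equal_make_drop_tag : Prop := ∀ (drop_layers : List Int), Dom_make_drop_tag drop_layers → Spec_make_drop_tag drop_layers (make_drop_tag drop_layers)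


-- ===== LEMMAS AND PROOFS =====

-- s[-1] on a nonempty list is its last element
theorem pyGetD_neg_one (s : List Int) (h : 0 < s.length) :
    PySem.List.pyGetD s (-1) 0 = s[s.length - 1]'(by omega) := by
  simp only [PySem.List.pyGetD, PySem.List.pyGet?, PySem.List.pyIdx?]
  rw [if_neg (by omega), if_pos (by omega)]
  simp [List.getElem?_eq_getElem (show s.length - 1 < s.length by omega)]

-- s[0] on a nonempty list
theorem pyGetD_zero (s : List Int) (h : 0 < s.length) :
    PySem.List.pyGetD s 0 0 = s[0]'h := by
  rw [PySem.List.pyGetD_eq_getElem s 0 (by omega) (by omega)]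
  simp

-- the contiguity property A's generator tests
def Contig (s : List Int) : Prop :=
  ∀ i : Nat, (h : i + 1 < s.length) → s[i]'(by omega) + 1 = s[i+1]'h

-- A's `all(...)` boolean equals Contig
theorem all_pyRange_iff_contig (s : List Int) :
    ((PySem.List.pyRange 0 ((s.length : Int) - 1)).all
      (fun i => PySem.List.pyGetD s i 0 + 1 == PySem.List.pyGetD s (i + 1) 0)) = true
    ↔ Contig s := by
  rw [List.all_eq_true]
  constructor
  · intro h i hi
    have hm : (i : Int) ∈ PySem.List.pyRange 0 ((s.length : Int) - 1) :=
      PySem.List.mem_pyRange_one.2 (by omega)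
    have h2 := h _ hm
    rw [beq_iff_eq, PySem.List.pyGetD_eq_getElem s 0 (by omega) (by omega),
        PySem.List.pyGetD_eq_getElem s 0 (by omega) (by omega)] at h2
    simpa using h2
  · intro hc x hx
    obtain ⟨hx0, hx1⟩ := PySem.List.mem_pyRange_one.1 hx
    have hxi : x = ((x.toNat : Nat) : Int) := by omega
    rw [beq_iff_eq, PySem.List.pyGetD_eq_getElem s 0 (by omega) (by omega),
        PySem.List.pyGetD_eq_getElem s 0 (by omega) (by omega)]
    have hz : (x + 1).toNat = x.toNat + 1 := by omega
    simp only [hz]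
    exact hc x.toNat (by omega)

-- under Contig the sorted list is an arithmetic progression with step 1
theorem contig_getElem (s : List Int) (hc : Contig s) :
    ∀ i : Nat, (h : i < s.length) → s[i]'h = s[0]'(by omega) + i := by
  intro i
  induction i with
  | zero => intro h; simp
  | succ n ih =>
    intro h
    have h1 := hc n h
    have h2 := ih (by omega)
    push_cast
    omega

-- a strictly increasing Int list grows at least linearly
theorem strict_grow (s : List Int) (hs : List.Pairwise (· < ·) s) :
    ∀ i j : Nat, (hij : i ≤ j) → (hj : j < s.length) →
      s[i]'(by omega) + ((j : Int) - (i : Int)) ≤ s[j]'hj := by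
  intro i j hij
  induction j, hij using Nat.le_induction with
  | base => intro hj; simp
  | succ n hn ih =>
    intro hj
    have h1 := ih (by omega)
    have h2 : s[n]'(by omega) < s[n+1]'hj :=
      List.pairwise_iff_getElem.1 hs n (n+1) (by omega) hj (by omega)
    push_cast
    omega

-- len(set(xs)) == len(xs) is exactly Nodup
theorem ofList_len_eq_iff (xs : List Int) :
    (PySem.Set.ofList xs).length = xs.length ↔ xs.Nodup := by
  have hperm : (PySem.Set.ofList xs).Perm xs.dedup :=
    (List.perm_ext_iff_of_nodup (PySem.Set.nodup_ofList xs) xs.nodup_dedup).2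
      (fun a => by simp [PySem.Set.mem_ofList, List.mem_dedup])
  rw [hperm.length_eq]
  constructor
  · intro h
    have h2 := List.Sublist.eq_of_length xs.dedup_sublist h
    rw [← h2]
    exact xs.nodup_dedup
  · intro h
    rw [List.dedup_eq_self.2 h]

-- ===== VERDICT (by name: the statement is the Claim_ definition above) =====
theorem make_drop_tag_spec : Claim_equal_make_drop_tag := by
  intro dl _
  unfold Spec_make_drop_tag
  by_cases hnil : dl = []
  · simp [make_drop_tag, make_drop_tag_alt, hnil]
  · simp only [make_drop_tag, make_drop_tag_alt, if_neg hnil]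
    set s := PySem.List.sorted dl (fun x => x) with hsdef
    have hlen : s.length = dl.length := PySem.List.length_sorted dl _ false
    have hperm : s.Perm dl := PySem.List.sorted_perm dl (fun x => x) false
    have hpos : 0 < s.length := by
      rcases Nat.eq_zero_or_pos s.length with h | h
      · exact absurd ((PySem.List.sorted_eq_nil_iff dl _ false).1 (List.eq_nil_of_length_eq_zero h)) hnil
      · exact h
    obtain ⟨lo, hlo⟩ : ∃ lo, PySem.List.min? dl (fun x => x) = some lo := by
      cases h : PySem.List.min? dl (fun x => x) with
      | none => exact absurd ((PySem.List.min?_eq_none_iff dl _).1 h) hnil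
      | some x => exact ⟨x, rfl⟩
    obtain ⟨hi, hhi⟩ : ∃ hi, PySem.List.max? dl (fun x => x) = some hi := by
      cases h : PySem.List.max? dl (fun x => x) with
      | none => exact absurd ((PySem.List.max?_eq_none_iff dl _).1 h) hnil
      | some x => exact ⟨x, rfl⟩
    simp only [hlo, hhi, Option.getD_some]
    have h0mem : s[0]'hpos ∈ dl := hperm.subset (s.getElem_mem hpos)
    have hlmem : s[s.length - 1]'(by omega) ∈ dl := hperm.subset (List.getElem_mem _)
    have hlo_eq : lo = s[0]'hpos := by
      have h1 : lo ≤ s[0]'hpos := PySem.List.min?_isMin hlo _ h0mem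
      obtain ⟨m, t, hmt⟩ : ∃ m t, s = m :: t := by
        cases hS : s with
        | nil => rw [hS] at hpos; simp at hpos
        | cons a b => exact ⟨a, b, rfl⟩
      have h2 : s[0]'hpos ≤ lo := by
        have h3 : m ≤ lo := PySem.List.key_head_sorted_le dl (fun x => x) (hsdef ▸ hmt)
          lo (PySem.List.min?_mem hlo)
        have h4 : s[0]'hpos = m := by simp [hmt]
        omega
      omega
    have hhi_eq : hi = s[s.length - 1]'(by omega) := by
      have h1 : s[s.length - 1]'(by omega) ≤ hi := PySem.List.max?_isMax hhi _ hlmem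
      have h2 : hi ≤ s[s.length - 1]'(by omega) := by
        obtain ⟨k, hk, hke⟩ := List.mem_iff_getElem.1 (hperm.mem_iff.2 (PySem.List.max?_mem hhi))
        have hp : List.Pairwise (· ≤ ·) s := PySem.List.sorted_pairwise dl (fun x => x)
        rcases Nat.lt_or_ge k (s.length - 1) with h | h
        · have h5 : s[k]'hk ≤ s[s.length - 1]'(by omega) :=
            List.pairwise_iff_getElem.1 hp k (s.length - 1) hk (by omega) h
          omega
        · have hk1 : k = s.length - 1 := by omega
          subst hk1
          omega
      omega
    -- the two branch conditions are equivalent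
    have hcond : (((PySem.List.pyRange 0 ((s.length : Int) - 1)).all
        (fun i => PySem.List.pyGetD s i 0 + 1 == PySem.List.pyGetD s (i + 1) 0)) = true)
        ↔ ((hi - lo == (dl.length : Int) - 1) &&
           (PySem.Set.len (PySem.Set.ofList dl) == (dl.length : Int))) = true := by
      rw [all_pyRange_iff_contig]
      simp only [Bool.and_eq_true, beq_iff_eq, PySem.Set.len, Nat.cast_inj]
      rw [ofList_len_eq_iff]
      constructor
      · intro hc
        have hlast := contig_getElem s hc (s.length - 1) (by omega)
        have hnd : s.Nodup := by
          have hlt : List.Pairwise (· < ·) s := by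
            rw [List.pairwise_iff_getElem]
            intro a b ha hb hab
            rw [contig_getElem s hc a (by omega), contig_getElem s hc b hb]
            omega
          exact hlt.imp ne_of_lt
        refine ⟨by rw [hlo_eq, hhi_eq]; omega, hperm.nodup_iff.1 hnd⟩
      · rintro ⟨hd, hnd⟩
        have hsnd : s.Nodup := hperm.nodup_iff.2 hnd
        have hlt : List.Pairwise (· < ·) s := by
          rw [List.pairwise_iff_getElem]
          intro a b ha hb hab
          have hle := List.pairwise_iff_getElem.1 (PySem.List.sorted_pairwise dl (fun x => x)) a b (hsdef ▸ ha) (hsdef ▸ hb) hab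
          have hne : s[a]'ha ≠ s[b]'hb := by
            intro he
            exact absurd (hsnd.getElem_inj_iff.1 he) (by omega)
          simp only [hsdef] at *
          omega
        intro i hi
        have hd2 : s[s.length - 1]'(by omega) - s[0]'hpos = (s.length : Int) - 1 := by
          rw [hlo_eq, hhi_eq] at hd
          omega
        have b1 := strict_grow s hlt 0 (i+1) (by omega) hi
        have b2 := strict_grow s hlt 0 i (by omega) (by omega)
        have b3 := strict_grow s hlt i (s.length - 1) (by omega) (by omega)
        have b4 := strict_grow s hlt (i+1) (s.length - 1) (by omega) (by omega)
        push_cast at b1 b2 b3 b4 hd2 ⊢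
        omega
    by_cases hA : ((PySem.List.pyRange 0 ((s.length : Int) - 1)).all
        (fun i => PySem.List.pyGetD s i 0 + 1 == PySem.List.pyGetD s (i + 1) 0)) = true
    · rw [if_pos hA, if_pos (hcond.1 hA)]
      rw [pyGetD_zero s hpos, pyGetD_neg_one s hpos, hlo_eq, hhi_eq]
    · rw [if_neg hA, if_neg (fun h => hA (hcond.2 h))]
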